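-- pv_equiv track=rewrite | github.com/dratizzo/Programas-python | lógica/acha_primo_mais_proximo_testeAutomatizado.py | maior_primo
-- ===== SOURCE A (Python) =====
-- def maior_primo(x):
--     contaDivisoes = 3
--
--     while contaDivisoes > 2:
--         contaDivisoes = 0
--         i = 1
--
--         while i < x:
--             if x % i == 0: #Se o número for divisível
--                 contaDivisoes += 1
--
--             i += 1 #Incrementa I para testar a quantidade de divisões
--
--         if contaDivisoes > 2:
--             x -= 1
--
--     if contaDivisoes < 3:
--         return x
-- ===== SOURCE B (Python) =====
-- def _ok(n):
--     # True iff n is prime or the square of a prime (equivalently: n >= 2 and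
--     # n has at most 3 divisors): no divisor d with 2 <= d and d*d < n.
--     d = 2
--     while d * d < n:
--         if n % d == 0:
--             return False
--         d += 1
--     return True
--
--
-- def maior_primo(x):
--     while x > 1 and not _ok(x):
--         x -= 1
--     return x
-- ===== Notes on version B (the rewrite author's own statement) =====
-- stated objective: faster
-- what changed: Instead of counting all divisors of each candidate by scanning 1..x-1 and restarting while the count exceeds 2, B descends candidates and rejects one as soon as trial division finds a divisor d with d*d < n (stopping at the square root), which accepts exactly the numbers that are 1, prime, or a prime squared.
import Mathlib
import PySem

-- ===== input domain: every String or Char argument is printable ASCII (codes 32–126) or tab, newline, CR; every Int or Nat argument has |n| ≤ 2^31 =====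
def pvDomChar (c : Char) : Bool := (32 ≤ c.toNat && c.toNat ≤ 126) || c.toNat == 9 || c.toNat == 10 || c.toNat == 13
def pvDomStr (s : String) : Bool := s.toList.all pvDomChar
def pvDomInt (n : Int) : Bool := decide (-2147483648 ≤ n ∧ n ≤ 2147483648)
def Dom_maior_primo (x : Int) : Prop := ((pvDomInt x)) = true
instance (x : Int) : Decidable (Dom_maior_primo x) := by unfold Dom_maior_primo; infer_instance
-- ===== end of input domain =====

-- B replaces A's full divisor count of every candidate (scan 1..x-1, restart while count > 2)
-- by a descending search that rejects a candidate as soon as trial division up to its square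
-- root finds a proper divisor; objective: faster (asymptotically fewer divisions).


-- ===== PORT A =====
-- inner 'while i < x' counting loop of A, as a fold over range(1, x)
def pvCountA (x : Int) : Int :=
  (PySem.List.pyRange 1 x 1).foldl
    (fun c i => if PySem.Int.mod x i = 0 then c + 1 else c) 0

theorem pvCountA_le (x : Int) : pvCountA x ≤ ((x - 1).toNat : Int) := by
  unfold pvCountA
  rw [PySem.List.foldl_ite_add_one]
  have h1 := List.countP_le_length
    (l := PySem.List.pyRange 1 x 1)
    (p := fun i => decide (PySem.Int.mod x i = 0))
  rw [PySem.List.length_pyRange_one] at h1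
  omega

-- outer 'while contaDivisoes > 2' loop of A: recompute the count, decrement x while it exceeds 2
def maior_primo (x : Int) : Int :=
  if h : pvCountA x > 2 then maior_primo (x - 1) else x
termination_by x.toNat
decreasing_by
  have := pvCountA_le x
  omega

-- ===== PORT B =====
-- Source B's _ok: trial division 'd = 2; while d * d < n'
def pvOkAux (n d : Int) : Bool :=
  if h : d * d < n then
    if PySem.Int.mod n d = 0 then false else pvOkAux n (d + 1)
  else true
termination_by (n - d).toNat
decreasing_by
  have hdn : d < n := by nlinarith [sq_nonneg d]
  omega

def pvOk (n : Int) : Bool := pvOkAux n 2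

-- Source B's maior_primo: 'while x > 1 and not _ok(x): x -= 1'
def maior_primo_alt (x : Int) : Int :=
  if h : x > 1 ∧ pvOk x = false then maior_primo_alt (x - 1) else x
termination_by x.toNat
decreasing_by omega

-- ===== PRECONDITION & SPEC =====
def Spec_maior_primo (x : Int) (out : Int) : Prop := out = maior_primo_alt x
instance (x : Int) (out : Int) : Decidable (Spec_maior_primo x out) := by unfold Spec_maior_primo; infer_instance

-- ===== CLAIM (what is proved, stated in full; the proofs are below) =====
def Claim_equal_maior_primo : Prop := ∀ (x : Int), Dom_maior_primo x → Spec_maior_primo x (maior_primo x)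

-- ===== LEMMAS AND PROOFS =====

-- pvOkAux n d = true ↔ no divisor e of n with d ≤ e and e*e < n
theorem pvOkAux_iff (n d : Int) (hd : 0 ≤ d) :
    pvOkAux n d = true ↔ ∀ e : Int, d ≤ e → e * e < n → ¬ (e ∣ n) := by
  rw [pvOkAux]
  split_ifs with h1 h2
  · simp only [false_iff]
    intro hall
    exact hall d le_rfl h1 ((PySem.Int.mod_eq_zero_iff_dvd n d).mp h2)
  · rw [pvOkAux_iff n (d + 1) (by omega)]
    constructor
    · intro ih e hde hee
      rcases eq_or_lt_of_le hde with rfl | hlt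
      · exact fun hdvd => h2 ((PySem.Int.mod_eq_zero_iff_dvd n d).mpr hdvd)
      · exact ih e (by omega) hee
    · intro hall e hde hee
      exact hall e (by omega) hee
  · simp only [true_iff]
    intro e hde hee
    exfalso
    have hd2 : d * d ≤ e * e := by nlinarith
    omega
termination_by (n - d).toNat
decreasing_by
  have hdn : d < n := by nlinarith [sq_nonneg d]
  omega

theorem pvCountA_eq_countP (x : Int) :
    pvCountA x = ((PySem.List.pyRange 1 x 1).countP
      (fun i => decide (PySem.Int.mod x i = 0)) : Int) := by
  unfold pvCountA
  rw [PySem.List.foldl_ite_add_one]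
  omega

-- the heart: for x ≥ 2, "at most 2 divisors below x" ↔ "no divisor d with 2 ≤ d, d² < x"
theorem count_le_two_iff_ok (x : Int) (hx : 2 ≤ x) :
    (pvCountA x ≤ 2 ↔ pvOk x = true) := by
  rw [pvCountA_eq_countP, pvOk, pvOkAux_iff _ _ (by omega)]
  rw [List.countP_eq_length_filter]
  set l := (PySem.List.pyRange 1 x 1).filter
      (fun i => decide (PySem.Int.mod x i = 0)) with hl
  have hmem : ∀ i : Int, i ∈ l ↔ (1 ≤ i ∧ i < x ∧ i ∣ x) := by
    intro i
    rw [hl, List.mem_filter, PySem.List.mem_pyRange_one]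
    simp [PySem.Int.mod_eq_zero_iff_dvd]
    tauto
  have hnd : l.Nodup := (PySem.List.nodup_pyRange_one 1 x).filter _
  constructor
  · -- length ≤ 2 → no bad divisor; contrapositive: a bad d gives 3 distinct elements of l
    intro hlen e hde hee hdvd
    obtain ⟨j, hj⟩ := hdvd
    have hj2 : 2 ≤ j := by nlinarith
    have hje : e < j := by nlinarith
    have hjx : j < x := by nlinarith
    have hsub : [1, e, j] ⊆ l := by
      intro i hi
      rw [hmem]
      simp only [List.mem_cons, List.not_mem_nil, or_false] at hi
      rcases hi with rfl | rfl | rfl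
      · exact ⟨le_refl 1, by omega, one_dvd x⟩
      · exact ⟨by omega, by omega, ⟨j, hj⟩⟩
      · exact ⟨by omega, hjx, ⟨e, by linarith [hj]⟩⟩
    have hnd3 : ([1, e, j] : List Int).Nodup := by
      simp [List.nodup_cons]
      omega
    have := (List.subperm_of_subset hnd3 hsub).length_le
    simp at this
    omega
  · -- no bad divisor → every element of l is 1 or the square root of x → length ≤ 2
    intro hall
    by_cases hsq : ∃ m : Int, 2 ≤ m ∧ m * m = x
    · obtain ⟨m, hm2, hmm⟩ := hsq
      have hsub : l ⊆ [1, m] := by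
        intro i hi
        rw [hmem] at hi
        obtain ⟨h1, h2, hdvd⟩ := hi
        simp only [List.mem_cons, List.not_mem_nil, or_false]
        rcases eq_or_lt_of_le h1 with rfl | h1'
        · exact Or.inl rfl
        · right
          have hige : ¬ (i * i < x) := fun hc => hall i (by omega) hc hdvd
          push Not at hige
          rcases eq_or_lt_of_le hige with heq | hgt
        -- i*i = x: i = m by uniqueness of positive square root
          · nlinarith
          · -- i*i > x: cofactor j = x/i is a bad divisor
            exfalso
            obtain ⟨j, hj⟩ := hdvd
            have hj2 : 2 ≤ j := by nlinarith
            have hji : j < i := by nlinarith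
            exact hall j (by omega) (by nlinarith) ⟨i, by linarith [hj]⟩
      have := (List.subperm_of_subset hnd hsub).length_le
      simp at this
      omega
    · push Not at hsq
      have hsub : l ⊆ [1] := by
        intro i hi
        rw [hmem] at hi
        obtain ⟨h1, h2, hdvd⟩ := hi
        simp only [List.mem_cons, List.not_mem_nil, or_false]
        rcases eq_or_lt_of_le h1 with rfl | h1'
        · rfl
        · exfalso
          have hige : ¬ (i * i < x) := fun hc => hall i (by omega) hc hdvd
          push Not at hige
          rcases eq_or_lt_of_le hige with heq | hgt
          · exact hsq i (by omega) heq.symm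
          · obtain ⟨j, hj⟩ := hdvd
            have hj2 : 2 ≤ j := by nlinarith
            have hji : j < i := by nlinarith
            exact hall j (by omega) (by nlinarith) ⟨i, by linarith [hj]⟩
      have := (List.subperm_of_subset hnd hsub).length_le
      simp at this
      omega

theorem maior_primo_eq (x : Int) : maior_primo x = maior_primo_alt x := by
  rw [maior_primo, maior_primo_alt]
  by_cases hx : 2 ≤ x
  · have hiff := count_le_two_iff_ok x hx
    by_cases hc : pvCountA x > 2
    · have hok : pvOk x = false := by
        cases h : pvOk x
        · rfl
        · exact absurd (hiff.mpr h) (by omega)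
      rw [dif_pos hc, dif_pos ⟨by omega, hok⟩]
      exact maior_primo_eq (x - 1)
    · have hok : pvOk x = true := hiff.mp (by omega)
      rw [dif_neg hc, dif_neg (by simp [hok])]
  · -- x ≤ 1: A's count is over an empty range, B's loop guard fails
    have hr : PySem.List.pyRange 1 x 1 = [] := PySem.List.pyRange_one_eq_nil (by omega)
    have hc : pvCountA x = 0 := by unfold pvCountA; rw [hr]; rfl
    rw [dif_neg (by omega), dif_neg (by omega)]
termination_by x.toNat
decreasing_by
  have := pvCountA_le x
  omega

-- ===== VERDICT (by name: the statement is the Claim_ definition above) =====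
theorem maior_primo_spec : Claim_equal_maior_primo := by
  intro x _
  unfold Spec_maior_primo
  exact maior_primo_eq x
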